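-- pv_equiv track=rewrite | github.com/SeongHyeon-Yun/Progarmmers | 프로그래머스/lv0/120956. 옹알이 （1）/옹알이 （1）.py | solution
-- ===== SOURCE A (Python) =====
-- def solution(babbling):
--     answer = 0
--
--     for i in babbling:
--         while True:
--             if i[:3] in ["aya","woo"]:
--                 i = i[3:]
--             elif i[:2] in ["ye", "ma"]:
--                 i = i[2:]
--             else:
--                 break
--
--         if i == "":
--             answer += 1
--     return answer
-- ===== SOURCE B (Python) =====
-- import re
--
-- _BABBLE = re.compile(r"(?:aya|woo|ye|ma)*")
--
-- def solution(babbling):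
--     return sum(1 for w in babbling if _BABBLE.fullmatch(w))
-- ===== Notes on version B (the rewrite author's own statement) =====
-- stated objective: idiomatic
-- what changed: Replaced the per-word while-loop that repeatedly strips 2/3-char prefixes off string slices with a single regex fullmatch of (aya|woo|ye|ma)* per word, summed with a generator expression.
import Mathlib
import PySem

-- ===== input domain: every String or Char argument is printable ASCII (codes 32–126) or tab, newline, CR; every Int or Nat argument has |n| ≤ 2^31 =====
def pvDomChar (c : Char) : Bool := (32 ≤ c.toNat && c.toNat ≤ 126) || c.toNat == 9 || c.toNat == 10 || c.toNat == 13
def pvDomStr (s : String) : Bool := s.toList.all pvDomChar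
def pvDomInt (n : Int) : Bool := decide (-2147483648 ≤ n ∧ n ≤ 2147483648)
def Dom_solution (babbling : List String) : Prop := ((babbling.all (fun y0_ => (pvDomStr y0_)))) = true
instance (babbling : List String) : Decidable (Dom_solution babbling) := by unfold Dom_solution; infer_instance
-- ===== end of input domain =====

-- B replaces A's per-word prefix-stripping while loop by a regex fullmatch of (aya|woo|ye|ma)* per word (idiomatic; same cost).


-- ===== PORT A =====
-- A's while loop on the word i: i[:3]/i[3:] (i[:2]/i[2:]) are List.take/List.drop on the
-- character list (exact: Python string slices with nonnegative bounds). The loop terminates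
-- because each stripping step shortens i.
def stripA (i : List Char) : List Char :=
  if i.take 3 = ['a','y','a'] ∨ i.take 3 = ['w','o','o'] then stripA (i.drop 3)
  else if i.take 2 = ['y','e'] ∨ i.take 2 = ['m','a'] then stripA (i.drop 2)
  else i
termination_by i.length
decreasing_by
  · rcases ‹_ ∨ _› with h | h <;>
      (simp only [List.length_drop]; have := congrArg List.length h; simp at this; omega)
  · rcases ‹_ ∨ _› with h | h <;>
      (simp only [List.length_drop]; have := congrArg List.length h; simp at this; omega)

def solution (babbling : List String) : Int :=
  babbling.foldl (fun answer i => if stripA i.toList = [] then answer + 1 else answer) 0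

-- ===== PORT B =====
-- Hand port of re.fullmatch(r"(?:aya|woo|ye|ma)*", w): exact, because the four alternatives
-- start with pairwise distinct letters, so the regex matches deterministically with no
-- backtracking — the recognizer below is that deterministic match.
def matchBabble : List Char → Bool
  | [] => true
  | 'a'::'y'::'a'::rest => matchBabble rest
  | 'w'::'o'::'o'::rest => matchBabble rest
  | 'y'::'e'::rest => matchBabble rest
  | 'm'::'a'::rest => matchBabble rest
  | _ => false

def solution_alt (babbling : List String) : Int :=
  ((babbling.countP (fun w => matchBabble w.toList) : Nat) : Int)

-- ===== PRECONDITION & SPEC =====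
def Spec_solution (babbling : List String) (out : Int) : Prop := out = solution_alt babbling
instance (babbling : List String) (out : Int) : Decidable (Spec_solution babbling out) := by unfold Spec_solution; infer_instance

-- ===== CLAIM (what is proved, stated in full; the proofs are below) =====
def Claim_equal_solution : Prop := ∀ (babbling : List String), Dom_solution babbling → Spec_solution babbling (solution babbling)

-- ===== LEMMAS AND PROOFS =====

theorem stripA_nil_iff_matchBabble (i : List Char) : (stripA i = []) ↔ matchBabble i = true := by
  fun_induction stripA i with
  | case1 i h ih =>
    rw [ih]
    rcases h with h | h
    · conv_rhs => rw [show i = ['a','y','a'] ++ i.drop 3 by rw [← h, List.take_append_drop]]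
      simp [matchBabble]
    · conv_rhs => rw [show i = ['w','o','o'] ++ i.drop 3 by rw [← h, List.take_append_drop]]
      simp [matchBabble]
  | case2 i h1 h h2 =>
    rw [h2]
    rcases h with h | h
    · conv_rhs => rw [show i = ['y','e'] ++ i.drop 2 by rw [← h, List.take_append_drop]]
      simp [matchBabble]
    · conv_rhs => rw [show i = ['m','a'] ++ i.drop 2 by rw [← h, List.take_append_drop]]
      simp [matchBabble]
  | case3 i h1 h2 =>
    constructor
    · rintro rfl; rfl
    · intro hm
      rw [matchBabble.eq_def] at hm
      split at hm <;> simp_all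

-- ===== VERDICT (by name: the statement is the Claim_ definition above) =====
theorem solution_spec : Claim_equal_solution := by
  intro babbling _
  show solution babbling = solution_alt babbling
  rw [solution, solution_alt]
  have hfun : ∀ w : String, (stripA w.toList = []) = (matchBabble w.toList = true) :=
    fun w => propext (stripA_nil_iff_matchBabble w.toList)
  simp only [hfun]
  simp only [PySem.List.foldl_if_add_one]
  simp
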